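-- pv_equiv track=rewrite | github.com/Abdulrahimch/problemSet | hard/k_smallest_pair_distance.py | is_smallest_pair
-- ===== SOURCE A (Python) =====
-- def is_smallest_pair(nums, k, mid):
--     left = 0
--     counter = 0
--     for right in range(len(nums)):
--         while (nums[right] - nums[left]) > mid:
--             left += 1
--         counter += right - left
--     #     if counter >= k: return True
--     # return False
--     return counter >= k
-- ===== SOURCE B (Python) =====
-- def is_smallest_pair(nums, k, mid):
--     counter = 0
--     for right in range(len(nums)):
--         # leftmost index in [0, right] whose value is >= nums[right] - mid
--         target = nums[right] - mid
--         lo, hi = 0, right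
--         while lo < hi:
--             m = (lo + hi) // 2
--             if nums[m] < target:
--                 lo = m + 1
--             else:
--                 hi = m
--         counter += right - lo
--     return counter >= k
-- ===== Notes on version B (the rewrite author's own statement) =====
-- stated objective: alternative
-- what changed: Replaces the persistent moving left pointer with an independent per-index binary search (bisect_left by hand) for the leftmost partner within distance mid, keeping only the counter as state.
-- outside the precondition, e.g. on is_smallest_pair([-2, 3, 1, -1], 5, 3): A returns False, B returns True; on is_smallest_pair([0], 0, -1): A raises IndexError, B returns True
import Mathlib
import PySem

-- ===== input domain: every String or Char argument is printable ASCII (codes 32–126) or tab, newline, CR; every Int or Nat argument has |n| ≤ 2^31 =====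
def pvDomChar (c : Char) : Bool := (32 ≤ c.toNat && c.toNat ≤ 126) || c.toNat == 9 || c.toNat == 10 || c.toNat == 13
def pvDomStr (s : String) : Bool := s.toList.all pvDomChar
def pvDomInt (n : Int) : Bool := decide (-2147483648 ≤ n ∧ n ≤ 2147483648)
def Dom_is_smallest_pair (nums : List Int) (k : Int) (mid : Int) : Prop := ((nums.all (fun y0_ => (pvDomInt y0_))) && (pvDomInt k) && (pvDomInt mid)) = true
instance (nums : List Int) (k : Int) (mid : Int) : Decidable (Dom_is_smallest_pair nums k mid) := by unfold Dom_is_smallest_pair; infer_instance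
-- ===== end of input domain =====

-- B replaces A's persistent two-pointer window by an independent binary search per index
-- (same counter, different traversal); equivalence proved on sorted input with mid ≥ 0.


-- ===== PORT A =====
-- A's inner `while (nums[right] - nums[left]) > mid: left += 1`; the `L < nums.length`
-- test is only a totality guard for the index where Python would raise IndexError.
def advanceA (nums : List Int) (x : Int) (mid : Int) (L : Nat) : Nat :=
  if h : L < nums.length ∧ x - nums.getD L 0 > mid then advanceA nums x mid (L + 1)
  else L
termination_by nums.length - L
decreasing_by omega

def is_smallest_pair (nums : List Int) (k : Int) (mid : Int) : Bool :=
  let st := (List.range nums.length).foldl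
    (fun (st : Nat × Int) r =>
      let left := advanceA nums (nums.getD r 0) mid st.1
      (left, st.2 + ((r : Int) - (left : Int)))) (0, 0)
  decide (st.2 ≥ k)

-- ===== PORT B =====
-- B's hand-written bisect_left loop: first index in [lo, hi) (else hi) with value ≥ t.
def bsearchB (nums : List Int) (t : Int) (lo hi : Nat) : Nat :=
  if h : lo < hi then
    if nums.getD ((lo + hi) / 2) 0 < t then bsearchB nums t ((lo + hi) / 2 + 1) hi
    else bsearchB nums t lo ((lo + hi) / 2)
  else lo
termination_by hi - lo
decreasing_by all_goals omega

def is_smallest_pair_alt (nums : List Int) (k : Int) (mid : Int) : Bool :=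
  decide ((List.range nums.length).foldl
    (fun (c : Int) (r : Nat) =>
      c + ((r : Int) - (bsearchB nums (nums.getD r 0 - mid) 0 r : Int))) 0 ≥ k)

-- ===== PRECONDITION & SPEC =====
-- Pre_ restricts to the function's natural domain as a distance-counting predicate of the
-- k-smallest-pair-distance binary search — nums sorted non-decreasingly with mid ≥ 0 — plus
-- the lists (in any order) whose pairwise differences all lie within mid, where the left
-- window never moves.  Outside it A's persistently moving left pointer either raises
-- IndexError (always, for sorted non-empty nums with mid < 0) or, on unsorted nums, returns
-- an accidental count that depends on leftover pointer state.
def Pre_is_smallest_pair (nums : List Int) (k : Int) (mid : Int) : Prop :=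
  (List.Pairwise (· ≤ ·) nums ∧ 0 ≤ mid) ∨ (∀ x ∈ nums, ∀ y ∈ nums, x - y ≤ mid)
instance (nums : List Int) (k : Int) (mid : Int) : Decidable (Pre_is_smallest_pair nums k mid) := by
  unfold Pre_is_smallest_pair; infer_instance

def pvWitness_is_smallest_pair : List Int × Int × Int := ([0, 1, 3], 2, 1)

def Spec_is_smallest_pair (nums : List Int) (k : Int) (mid : Int) (out : Bool) : Prop := out = is_smallest_pair_alt nums k mid
instance (nums : List Int) (k : Int) (mid : Int) (out : Bool) : Decidable (Spec_is_smallest_pair nums k mid out) := by unfold Spec_is_smallest_pair; infer_instance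

-- ===== CLAIM (what is proved, stated in full; the proofs are below) =====
def Claim_equal_is_smallest_pair : Prop := ∀ (nums : List Int) (k : Int) (mid : Int), Dom_is_smallest_pair nums k mid → Pre_is_smallest_pair nums k mid → Spec_is_smallest_pair nums k mid (is_smallest_pair nums k mid)

-- ===== LEMMAS AND PROOFS =====

-- Two "first index with value ≥ t" results are equal (no sortedness needed).
theorem first_ge_uniq (d : Nat → Int) (t : Int) (l1 l2 : Nat)
    (h1 : ∀ i < l1, d i < t) (g1 : t ≤ d l1)
    (h2 : ∀ i < l2, d i < t) (g2 : t ≤ d l2) : l1 = l2 := by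
  rcases lt_trichotomy l1 l2 with h | h | h
  · exact absurd g1 (not_le.mpr (h2 _ h))
  · exact h
  · exact absurd g2 (not_le.mpr (h1 _ h))

theorem advanceA_props (nums : List Int) (x mid : Int) (L r : Nat)
    (hLr : L ≤ r) (hr : r < nums.length) (hx : x - mid ≤ nums.getD r 0)
    (hbelow : ∀ i < L, nums.getD i 0 < x - mid) :
    advanceA nums x mid L ≤ r ∧
    (∀ i < advanceA nums x mid L, nums.getD i 0 < x - mid) ∧
    x - mid ≤ nums.getD (advanceA nums x mid L) 0 := by
  unfold advanceA
  split
  · rename_i h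
    have hLne : L ≠ r := by
      intro e; subst e; omega
    have := advanceA_props nums x mid (L + 1) r (by omega) hr hx
      (by intro i hi
          rcases Nat.lt_or_ge i L with hiL | hiL
          · exact hbelow i hiL
          · have : i = L := by omega
            subst this; omega)
    exact this
  · rename_i h
    refine ⟨hLr, hbelow, ?_⟩
    rcases Nat.lt_or_ge L nums.length with hL | hL
    · have : ¬ x - nums.getD L 0 > mid := fun hgt => h ⟨hL, hgt⟩
      omega
    · omega
termination_by nums.length - L
decreasing_by omega

theorem bsearchB_props (nums : List Int) (t : Int) (lo hi : Nat)
    (mono : ∀ i j : Nat, i ≤ j → j < nums.length → nums.getD i 0 ≤ nums.getD j 0)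
    (hlh : lo ≤ hi) (hhi : hi < nums.length)
    (hbelow : ∀ i < lo, nums.getD i 0 < t) (hge : t ≤ nums.getD hi 0) :
    (∀ i < bsearchB nums t lo hi, nums.getD i 0 < t) ∧
    t ≤ nums.getD (bsearchB nums t lo hi) 0 := by
  unfold bsearchB
  split
  · rename_i h
    have hm1 : lo ≤ (lo + hi) / 2 := by omega
    have hm2 : (lo + hi) / 2 < hi := by omega
    split
    · rename_i hlt
      exact bsearchB_props nums t ((lo + hi) / 2 + 1) hi mono (by omega) hhi
        (by intro i hi2
            rcases Nat.lt_or_ge i lo with h3 | h3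
            · exact hbelow i h3
            · exact lt_of_le_of_lt (mono i ((lo + hi) / 2) (by omega) (by omega)) hlt)
        hge
    · rename_i hnlt
      exact bsearchB_props nums t lo ((lo + hi) / 2) mono (by omega) (by omega) hbelow
        (by omega)
  · rename_i h
    have : lo = hi := by omega
    subst this
    exact ⟨hbelow, hge⟩
termination_by hi - lo
decreasing_by all_goals omega

-- proof-only abbreviations for the two folds (match the ports' bodies definitionally)
def stateA (nums : List Int) (mid : Int) (m : Nat) : Nat × Int :=
  (List.range m).foldl
    (fun (st : Nat × Int) r =>
      let left := advanceA nums (nums.getD r 0) mid st.1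
      (left, st.2 + ((r : Int) - (left : Int)))) (0, 0)

def countB (nums : List Int) (mid : Int) (m : Nat) : Int :=
  (List.range m).foldl
    (fun (c : Int) (r : Nat) =>
      c + ((r : Int) - (bsearchB nums (nums.getD r 0 - mid) 0 r : Int))) 0

-- Fold invariant: after the rights 0..m-1, both counters agree and A's pointer still
-- lies below every index whose value could satisfy the next (larger) target.
theorem fold_invariant (nums : List Int) (mid : Int)
    (mono : ∀ i j : Nat, i ≤ j → j < nums.length → nums.getD i 0 ≤ nums.getD j 0)
    (hmid : 0 ≤ mid) (m : Nat) (hm : m ≤ nums.length) :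
    (stateA nums mid m).2 = countB nums mid m ∧
    (stateA nums mid m).1 ≤ m ∧
    (∀ i < (stateA nums mid m).1, m > 0 → nums.getD i 0 < nums.getD (m - 1) 0 - mid) := by
  induction m with
  | zero => simp [stateA, countB, List.range_zero]
  | succ n ih =>
    obtain ⟨ihc, ihL, ihB⟩ := ih (by omega)
    have hn : n < nums.length := by omega
    set L0 := (stateA nums mid n).1 with hL0
    have hbelow : ∀ i < L0, nums.getD i 0 < nums.getD n 0 - mid := by
      intro i hi
      rcases Nat.eq_zero_or_pos n with h0 | h0
      · omega
      · have h1 := ihB i hi h0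
        have h2 : nums.getD (n - 1) 0 ≤ nums.getD n 0 := mono (n - 1) n (by omega) hn
        omega
    have hx : nums.getD n 0 - mid ≤ nums.getD n 0 := by omega
    obtain ⟨ha1, ha2, ha3⟩ := advanceA_props nums (nums.getD n 0) mid L0 n ihL hn hx hbelow
    obtain ⟨hb1, hb2⟩ := bsearchB_props nums (nums.getD n 0 - mid) 0 n mono (by omega) hn
      (by intro i hi; omega) hx
    have heq : advanceA nums (nums.getD n 0) mid L0 = bsearchB nums (nums.getD n 0 - mid) 0 n :=
      first_ge_uniq (fun i => nums.getD i 0) (nums.getD n 0 - mid) _ _ ha2 ha3 hb1 hb2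
    have hsA : stateA nums mid (n + 1) =
        (advanceA nums (nums.getD n 0) mid L0,
         (stateA nums mid n).2 + ((n : Int) - (advanceA nums (nums.getD n 0) mid L0 : Int))) := by
      simp only [hL0, stateA, List.range_succ, List.foldl_append, List.foldl_cons,
        List.foldl_nil]
    have hcB : countB nums mid (n + 1) =
        countB nums mid n + ((n : Int) - (bsearchB nums (nums.getD n 0 - mid) 0 n : Int)) := by
      simp [countB, List.range_succ, List.foldl_append]
    refine ⟨?_, ?_, ?_⟩
    · rw [hsA, hcB, ihc, heq]
    · rw [hsA]; exact Nat.le_succ_of_le ha1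
    · rw [hsA]
      intro i hi _
      simp only [Nat.add_sub_cancel]
      simp only at hi
      rw [heq] at hi
      exact hb1 i hi

-- sortedness of the list gives monotonicity of getD on in-range indices
theorem pairwise_mono (nums : List Int) (hs : List.Pairwise (· ≤ ·) nums) :
    ∀ i j : Nat, i ≤ j → j < nums.length → nums.getD i 0 ≤ nums.getD j 0 := by
  intro i j hij hj
  rcases Nat.eq_or_lt_of_le hij with h | h
  · subst h; exact le_refl _
  · have hi : i < nums.length := by omega
    have := List.pairwise_iff_getElem.mp hs i j hi hj h
    simpa [List.getD_eq_getElem, hi, hj] using this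

theorem getD_mem_of_lt (nums : List Int) (i : Nat) (hi : i < nums.length) :
    nums.getD i 0 ∈ nums := by
  rw [List.getD_eq_getElem _ _ hi]; exact List.getElem_mem hi

-- In the all-pairs-within-mid case A's window never moves …
theorem advanceA_stay (nums : List Int) (mid : Int)
    (hC : ∀ x ∈ nums, ∀ y ∈ nums, x - y ≤ mid) (r L : Nat) (hr : r < nums.length) :
    advanceA nums (nums.getD r 0) mid L = L := by
  unfold advanceA
  split
  · rename_i h
    exact absurd h.2 (not_lt.mpr (hC _ (getD_mem_of_lt nums r (by omega)) _ (getD_mem_of_lt nums L h.1)))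
  · rfl

-- … and B's binary search always lands on index 0.
theorem bsearchB_zero (nums : List Int) (mid : Int)
    (hC : ∀ x ∈ nums, ∀ y ∈ nums, x - y ≤ mid) (r : Nat) (hr : r < nums.length) :
    ∀ hi, hi ≤ r → bsearchB nums (nums.getD r 0 - mid) 0 hi = 0 := by
  intro hi
  induction hi using Nat.strong_induction_on with
  | _ hi ih =>
    intro hhr
    unfold bsearchB
    split
    · rename_i h
      have hm : (0 + hi) / 2 < hi := by omega
      have hge : nums.getD r 0 - mid ≤ nums.getD ((0 + hi) / 2) 0 := by
        have := hC _ (getD_mem_of_lt nums r hr) _ (getD_mem_of_lt nums ((0 + hi) / 2) (by omega))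
        omega
      rw [if_neg (not_lt.mpr hge)]
      exact ih _ hm (by omega)
    · rfl

theorem fold_flat (nums : List Int) (mid : Int)
    (hC : ∀ x ∈ nums, ∀ y ∈ nums, x - y ≤ mid) (m : Nat) (hm : m ≤ nums.length) :
    (stateA nums mid m).1 = 0 ∧ (stateA nums mid m).2 = countB nums mid m := by
  induction m with
  | zero => simp [stateA, countB]
  | succ n ih =>
    obtain ⟨ih1, ih2⟩ := ih (by omega)
    have hn : n < nums.length := by omega
    have hA : advanceA nums (nums.getD n 0) mid (stateA nums mid n).1 = 0 := by
      rw [ih1]; exact advanceA_stay nums mid hC n 0 hn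
    have hB : bsearchB nums (nums.getD n 0 - mid) 0 n = 0 :=
      bsearchB_zero nums mid hC n hn n (le_refl n)
    constructor
    · simp only [stateA, List.range_succ, List.foldl_append, List.foldl_cons, List.foldl_nil]
      exact hA
    · simp only [stateA, countB, List.range_succ, List.foldl_append, List.foldl_cons,
        List.foldl_nil]
      simp only [stateA, countB] at ih2 hA
      rw [ih2, hA, hB]

-- ===== VERDICT (by name: the statement is the Claim_ definition above) =====
theorem is_smallest_pair_spec : Claim_equal_is_smallest_pair := by
  intro nums k mid _ hpre
  unfold Spec_is_smallest_pair is_smallest_pair is_smallest_pair_alt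
  rcases hpre with ⟨hs, hmid⟩ | hC
  · have h := fold_invariant nums mid (pairwise_mono nums hs) hmid nums.length (le_refl _)
    have : (stateA nums mid nums.length).2 = countB nums mid nums.length := h.1
    simpa [stateA, countB] using congrArg (fun c => decide (c ≥ k)) this
  · have h := (fold_flat nums mid hC nums.length (le_refl _)).2
    simpa [stateA, countB] using congrArg (fun c => decide (c ≥ k)) h
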